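-- pv_equiv track=rewrite | github.com/mbforbes/mapgen | graph.py | can_add_to_shortest
-- ===== SOURCE A (Python) =====
-- from typing import Dict, Set, Tuple, List
--
-- def can_add_to_shortest(cur: int, curpath: List[int], shortest: Dict[int, List[List[int]]]) -> bool:
--     # if shortest hasn't found cur yet, then yes (because BFS finds shortest
--     # path lens)
--     if cur not in shortest:
--         return True
--
--     assert len(curpath) >= 2, 'algorithm expects paths to be >= 2 in len'
--
--     # if the path is just 2 (i.e., directly from start to this node), but a
--     # different path has already been added, then our graph construction is
--     # weird; that means we have multiple paths from the start to cur. let's not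
--     # add it for now.
--     if len(curpath) == 2:
--         return False
--
--     # now, for the interesting case. We want to add only if we've found a new
--     # path to this node that is unique; i.e., the middle nodes (excluding start
--     # and cur) have nothing in common with any other paths.
--     curpath_middle_nodes = set(curpath[1:-1])
--     for existing_path in shortest[cur]:
--         existing_path_middle_nodes = set(existing_path[1:-1])
--         if len(existing_path_middle_nodes.intersection(curpath_middle_nodes)) > 0:
--             return False
--     return True
-- ===== SOURCE B (Python) =====
-- def can_add_to_shortest(cur, curpath, shortest):
--     if cur not in shortest:
--         return True
--     assert len(curpath) >= 2, 'algorithm expects paths to be >= 2 in len'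
--     if len(curpath) == 2:
--         return False
--     # sort-and-merge: sort both interior-node sets and sweep with two pointers;
--     # a common element would appear as an equal head during the merge.
--     mine = sorted(set(curpath[1:-1]))
--     theirs = sorted({n for p in shortest[cur] for n in p[1:-1]})
--     i = j = 0
--     while i < len(mine) and j < len(theirs):
--         if mine[i] == theirs[j]:
--             return False
--         elif mine[i] < theirs[j]:
--             i += 1
--         else:
--             j += 1
--     return True
-- ===== Notes on version B (the rewrite author's own statement) =====
-- stated objective: alternative
-- what changed: A intersects a freshly built set of each existing path's middle nodes with the current path's middle set, returning early; B instead sorts the deduplicated middle nodes of the current path and of all existing paths and detects a common node by a two-pointer merge sweep over the two sorted lists (sort-then-merge instead of hashing/intersection).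
import Mathlib
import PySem

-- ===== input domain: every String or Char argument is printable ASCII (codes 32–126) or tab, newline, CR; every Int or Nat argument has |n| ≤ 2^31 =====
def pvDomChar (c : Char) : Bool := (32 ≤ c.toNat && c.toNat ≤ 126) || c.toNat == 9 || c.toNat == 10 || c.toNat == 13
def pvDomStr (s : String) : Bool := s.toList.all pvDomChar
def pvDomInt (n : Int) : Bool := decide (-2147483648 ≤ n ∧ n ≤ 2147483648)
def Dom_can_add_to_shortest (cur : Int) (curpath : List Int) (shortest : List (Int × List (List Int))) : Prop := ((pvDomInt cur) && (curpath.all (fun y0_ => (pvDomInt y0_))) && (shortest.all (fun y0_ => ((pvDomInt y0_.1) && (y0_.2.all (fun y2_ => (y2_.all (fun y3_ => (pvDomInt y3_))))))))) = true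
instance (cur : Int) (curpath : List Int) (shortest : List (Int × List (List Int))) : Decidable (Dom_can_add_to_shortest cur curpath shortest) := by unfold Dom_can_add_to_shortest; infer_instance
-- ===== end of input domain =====

-- B replaces A's per-existing-path set intersection (with early exit) by sorting the two
-- deduplicated middle-node collections and sweeping them with a two-pointer merge (objective: alternative).

-- ===== PORT A =====
-- the 'for existing_path in shortest[cur]' loop with its early 'return False'
def pvALoop (mid : PySem.Set Int) (paths : List (List Int)) : Bool :=
  match paths with
  | [] => true
  | p :: rest =>
    let em := PySem.Set.ofList (PySem.List.slice p (some 1) (some (-1)))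
    if PySem.Set.len (PySem.Set.inter em mid) > 0 then false else pvALoop mid rest

def can_add_to_shortest (cur : Int) (curpath : List Int) (shortest : List (Int × List (List Int))) : Bool :=
  match PySem.Dict.get? (PySem.Dict.mk shortest) cur with
  | none => true          -- cur not in shortest
  | some paths =>
    -- assert len(curpath) >= 2 : raises AssertionError when violated; excluded by Pre_
    if curpath.length == 2 then false
    else pvALoop (PySem.Set.ofList (PySem.List.slice curpath (some 1) (some (-1)))) paths

-- ===== PORT B =====
-- the while loop with pointers i, j advancing through the two sorted lists
def pvTwoPtr (mine theirs : List Int) : Bool :=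
  match mine, theirs with
  | [], _ => true
  | _ :: _, [] => true
  | x :: xs, y :: ys =>
    if x = y then false
    else if x < y then pvTwoPtr xs (y :: ys)
    else pvTwoPtr (x :: xs) ys
termination_by mine.length + theirs.length

def can_add_to_shortest_alt (cur : Int) (curpath : List Int) (shortest : List (Int × List (List Int))) : Bool :=
  match PySem.Dict.get? (PySem.Dict.mk shortest) cur with
  | none => true
  | some paths =>
    -- assert len(curpath) >= 2 : raises AssertionError when violated; excluded by Pre_
    if curpath.length == 2 then false
    else
      let mine := PySem.List.sorted
        (PySem.Set.ofList (PySem.List.slice curpath (some 1) (some (-1)))) (fun x => x) false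
      let theirs := PySem.List.sorted
        (PySem.Set.ofList (paths.flatMap (fun p => PySem.List.slice p (some 1) (some (-1)))))
        (fun x => x) false
      pvTwoPtr mine theirs

-- ===== PRECONDITION & SPEC =====
-- Pre_ excludes exactly the inputs where the assert raises AssertionError (in A and in B alike):
-- cur present in shortest but len(curpath) < 2.
def Pre_can_add_to_shortest (cur : Int) (curpath : List Int) (shortest : List (Int × List (List Int))) : Prop :=
  PySem.Dict.contains (PySem.Dict.mk shortest) cur = true → 2 ≤ curpath.length
instance (cur : Int) (curpath : List Int) (shortest : List (Int × List (List Int))) : Decidable (Pre_can_add_to_shortest cur curpath shortest) := by unfold Pre_can_add_to_shortest; infer_instance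

def pvWitness_can_add_to_shortest : Int × List Int × (List (Int × List (List Int))) :=
  (1, [0, 2, 1], [(1, [[0, 3, 1]])])

def Spec_can_add_to_shortest (cur : Int) (curpath : List Int) (shortest : List (Int × List (List Int))) (out : Bool) : Prop := out = can_add_to_shortest_alt cur curpath shortest
instance (cur : Int) (curpath : List Int) (shortest : List (Int × List (List Int))) (out : Bool) : Decidable (Spec_can_add_to_shortest cur curpath shortest out) := by unfold Spec_can_add_to_shortest; infer_instance

-- ===== CLAIM (what is proved, stated in full; the proofs are below) =====
def Claim_equal_can_add_to_shortest : Prop := ∀ (cur : Int) (curpath : List Int) (shortest : List (Int × List (List Int))), Dom_can_add_to_shortest cur curpath shortest → Pre_can_add_to_shortest cur curpath shortest → Spec_can_add_to_shortest cur curpath shortest (can_add_to_shortest cur curpath shortest)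

-- ===== LEMMAS AND PROOFS =====

-- A's loop returns true iff no existing path's middle nodes meet mid
theorem pvALoop_eq_true_iff (mid : PySem.Set Int) (paths : List (List Int)) :
    pvALoop mid paths = true ↔
      ∀ p ∈ paths, ∀ x ∈ PySem.List.slice p (some 1) (some (-1)), x ∉ mid := by
  induction paths with
  | nil => simp [pvALoop]
  | cons p rest ih =>
    simp only [pvALoop]
    by_cases h : PySem.Set.len (PySem.Set.inter (PySem.Set.ofList (PySem.List.slice p (some 1) (some (-1)))) mid) > 0
    · simp only [if_pos h]
      constructor
      · intro hf; exact absurd hf (by simp)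
      · intro hall
        exfalso
        have hne : PySem.Set.inter (PySem.Set.ofList (PySem.List.slice p (some 1) (some (-1)))) mid ≠ [] := by
          intro he
          rw [PySem.Set.len, he] at h
          simp at h
        obtain ⟨x, hx⟩ := List.exists_mem_of_ne_nil _ hne
        rw [PySem.Set.mem_inter] at hx
        exact hall p (by simp) x (by
          have := hx.1
          rwa [PySem.Set.mem_ofList] at this) hx.2
    · simp only [if_neg h, ih]
      constructor
      · intro hall q hq x hx
        rw [List.mem_cons] at hq
        rcases hq with rfl | hq
        · intro hxm
          apply h
          have : x ∈ PySem.Set.inter (PySem.Set.ofList (PySem.List.slice q (some 1) (some (-1)))) mid := by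
            rw [PySem.Set.mem_inter, PySem.Set.mem_ofList]; exact ⟨hx, hxm⟩
          rw [PySem.Set.len]
          exact_mod_cast List.length_pos_of_mem this
        · exact hall q hq x hx
      · intro hall q hq x hx
        exact hall q (List.mem_cons_of_mem _ hq) x hx

-- on strictly increasing lists the two-pointer sweep decides disjointness
theorem pvTwoPtr_eq_true_iff (mine theirs : List Int)
    (hm : mine.Pairwise (· < ·)) (ht : theirs.Pairwise (· < ·)) :
    pvTwoPtr mine theirs = true ↔ ∀ x ∈ mine, x ∉ theirs := by
  induction mine, theirs using pvTwoPtr.induct with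
  | case1 theirs => simp [pvTwoPtr]
  | case2 x xs => simp [pvTwoPtr]
  | case3 xs y ys =>
    have hf : pvTwoPtr (y :: xs) (y :: ys) = false := by simp [pvTwoPtr]
    rw [hf]
    simp only [Bool.false_eq_true, false_iff]
    intro hall
    exact hall y (by simp) (by simp)
  | case4 x xs y ys hne hlt ih =>
    rw [pvTwoPtr, if_neg hne, if_pos hlt,
      ih (List.Pairwise.of_cons hm) ht]
    constructor
    · intro hall z hz
      rcases List.mem_cons.mp hz with rfl | hz'
      · intro hmem
        rcases List.mem_cons.mp hmem with rfl | hmem'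
        · exact hne rfl
        · have := (List.pairwise_cons.mp ht).1 z hmem'
          omega
      · exact hall z hz'
    · intro hall z hz; exact hall z (List.mem_cons_of_mem _ hz)
  | case5 x xs y ys hne hge ih =>
    rw [pvTwoPtr, if_neg hne, if_neg hge,
      ih hm (List.Pairwise.of_cons ht)]
    have hylt : ∀ z ∈ x :: xs, y < z := by
      intro z hz
      rcases List.mem_cons.mp hz with rfl | hz'
      · omega
      · have := (List.pairwise_cons.mp hm).1 z hz'
        omega
    constructor
    · intro hall z hz hmem
      rcases List.mem_cons.mp hmem with rfl | hmem'
      · exact absurd (hylt z hz) (lt_irrefl z)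
      · exact hall z hz hmem'
    · intro hall z hz; exact hall z hz ∘ List.mem_cons_of_mem _

-- the interesting case: sort-and-sweep equals the per-path intersection loop
theorem pv_core (curpath : List Int) (paths : List (List Int)) :
    pvALoop (PySem.Set.ofList (PySem.List.slice curpath (some 1) (some (-1)))) paths =
      pvTwoPtr
        (PySem.List.sorted (PySem.Set.ofList (PySem.List.slice curpath (some 1) (some (-1)))) (fun x => x) false)
        (PySem.List.sorted (PySem.Set.ofList (paths.flatMap (fun p => PySem.List.slice p (some 1) (some (-1))))) (fun x => x) false) := by
  rw [Bool.eq_iff_iff, pvALoop_eq_true_iff,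
    pvTwoPtr_eq_true_iff _ _ (PySem.List.sorted_ofList_pairwise_lt _)
      (PySem.List.sorted_ofList_pairwise_lt _)]
  simp only [PySem.List.mem_sorted, PySem.Set.mem_ofList, List.mem_flatMap]
  constructor
  · intro hall x hx hmem
    obtain ⟨p, hp, hxp⟩ := hmem
    exact hall p hp x hxp hx
  · intro hall p hp x hx hxm
    exact hall x hxm ⟨p, hp, hx⟩

-- ===== VERDICT (by name: the statement is the Claim_ definition above) =====
theorem can_add_to_shortest_spec : Claim_equal_can_add_to_shortest := by
  intro cur curpath shortest _ _
  unfold Spec_can_add_to_shortest can_add_to_shortest can_add_to_shortest_alt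
  cases h : PySem.Dict.get? (PySem.Dict.mk shortest) cur with
  | none => rfl
  | some paths =>
    by_cases h2 : curpath.length == 2
    · simp [h2]
    · simp only [h2, Bool.false_eq_true]
      exact pv_core curpath paths
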